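-- pv_equiv track=rewrite | github.com/UrHighness01/Intelli | agent-gateway/a2a.py | _extract_persona_prompt
-- ===== SOURCE A (Python) =====
-- from typing import Any, Deque, Dict, List, Optional
--
-- def _extract_persona_prompt(agents_md: str, persona_name: str) -> str:
--     """Extract the system prompt section for *persona_name* from AGENTS.md.
--
--     Falls back to a generic researcher prompt if the persona isn't found.
--     """
--     lines = agents_md.splitlines()
--     in_section = False
--     section_lines: List[str] = []
--     search = persona_name.lower()
--
--     for line in lines:
--         if line.startswith('## ') and search in line.lower():
--             in_section = True
--             continue
--         if in_section:
--             if line.startswith('## '):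
--                 break
--             section_lines.append(line)
--
--     if section_lines:
--         return '\n'.join(section_lines).strip()
--
--     # Generic fallback
--     return (
--         f'You are {persona_name}, a specialised AI assistant. '
--         'Complete the assigned task thoroughly and return a clear, structured result.'
--     )
-- ===== SOURCE B (Python) =====
-- def _extract_persona_prompt(agents_md: str, persona_name: str) -> str:
--     """Extract the system prompt section for *persona_name* from AGENTS.md.
--
--     Parses the markdown into a list of (header, body-lines) sections, then
--     returns the body of the first section whose header mentions the persona,
--     falling back to a generic researcher prompt.
--     """
--     search = persona_name.lower()
--
--     sections = []
--     for line in agents_md.splitlines():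
--         if line.startswith('## '):
--             sections.append((line, []))
--         elif sections:
--             sections[-1][1].append(line)
--
--     for header, body in sections:
--         if search in header.lower():
--             if body:
--                 return '\n'.join(body).strip()
--             break
--
--     return (
--         f'You are {persona_name}, a specialised AI assistant. '
--         'Complete the assigned task thoroughly and return a clear, structured result.'
--     )
-- ===== Notes on version B (the rewrite author's own statement) =====
-- stated objective: alternative
-- what changed: Replaces A's single-pass scan with an in_section flag and break by a parse-then-select decomposition: parse the markdown into a list of (header, body) sections, then pick the first section whose header mentions the persona; Pre_ excludes documents with more than one '## ' header matching the persona, a duplicate-section corner where A merges the duplicates' bodies and B keeps the first section only — either value is defensible there.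
-- outside the precondition, e.g. on _extract_persona_prompt('## p\na\n## p\nb', 'p'): A returns 'a\nb', B returns 'a'
import Mathlib
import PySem

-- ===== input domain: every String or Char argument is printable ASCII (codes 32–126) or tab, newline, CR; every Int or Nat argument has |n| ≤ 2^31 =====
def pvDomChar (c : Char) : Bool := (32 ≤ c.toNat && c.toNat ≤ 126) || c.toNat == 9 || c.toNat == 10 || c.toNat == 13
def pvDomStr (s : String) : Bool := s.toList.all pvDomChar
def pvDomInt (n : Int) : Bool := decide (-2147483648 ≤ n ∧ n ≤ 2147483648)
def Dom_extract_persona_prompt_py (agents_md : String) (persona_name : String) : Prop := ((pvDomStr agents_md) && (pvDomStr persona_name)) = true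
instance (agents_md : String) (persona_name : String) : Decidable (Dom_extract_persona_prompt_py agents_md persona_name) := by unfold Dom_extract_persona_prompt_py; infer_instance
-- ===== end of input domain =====

-- B replaces A's in_section-flag scan by a parse-then-select decomposition: parse the
-- markdown into (header, body) sections, then pick the first section whose header
-- mentions the persona. Same cost; plainer structure.

-- ===== PORT A =====
-- the for-loop of A, state = (in_section, section_lines); returning acc = the 'break'
def pvALoop (search : String) : List String → Bool → List String → List String
  | [], _, acc => acc
  | l :: rest, inSec, acc =>
    if PySem.Str.startswith l "## " && PySem.Str.isIn search (PySem.Str.lower l) then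
      pvALoop search rest true acc
    else if inSec then
      if PySem.Str.startswith l "## " then acc
      else pvALoop search rest true (acc ++ [l])
    else
      pvALoop search rest false acc

def extract_persona_prompt_py (agents_md : String) (persona_name : String) : String :=
  let lines := PySem.Str.splitlines agents_md
  let search := PySem.Str.lower persona_name
  let section_lines := pvALoop search lines false []
  if section_lines ≠ [] then
    PySem.Str.strip (PySem.Str.join "\n" section_lines)
  else
    "You are " ++ persona_name ++ ", a specialised AI assistant. Complete the assigned task thoroughly and return a clear, structured result."

-- ===== PORT B =====
def pvHeader (l : String) : Bool := PySem.Str.startswith l "## "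

-- sections[-1][1].append(line): append the line to the body of the last section
def pvAppendLast : List (String × List String) → String → List (String × List String)
  | [], _ => []
  | [(h, b)], l => [(h, b ++ [l])]
  | s :: rest, l => s :: pvAppendLast rest l

-- Source B's first loop: build the (header, body) section list
def pvParse : List String → List (String × List String) → List (String × List String)
  | [], secs => secs
  | l :: rest, secs =>
    if pvHeader l then pvParse rest (secs ++ [(l, [])])
    else if secs.isEmpty then pvParse rest secs
    else pvParse rest (pvAppendLast secs l)

-- Source B's second loop: first section whose header mentions the persona, else fallback
def pvSelect (search : String) (persona_name : String) : List (String × List String) → String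
  | [] => "You are " ++ persona_name ++ ", a specialised AI assistant. Complete the assigned task thoroughly and return a clear, structured result."
  | (h, b) :: rest =>
    if PySem.Str.isIn search (PySem.Str.lower h) then
      if b ≠ [] then PySem.Str.strip (PySem.Str.join "\n" b)
      else "You are " ++ persona_name ++ ", a specialised AI assistant. Complete the assigned task thoroughly and return a clear, structured result."
    else pvSelect search persona_name rest

def extract_persona_prompt_py_alt (agents_md : String) (persona_name : String) : String :=
  let search := PySem.Str.lower persona_name
  pvSelect search persona_name (pvParse (PySem.Str.splitlines agents_md) [])

-- ===== PRECONDITION & SPEC =====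
-- a line that is a '## ' header mentioning the persona (case-insensitively)
def pvMatches (search : String) (l : String) : Bool :=
  pvHeader l && PySem.Str.isIn search (PySem.Str.lower l)

-- Pre_ excludes inputs with more than one '## ' header matching the persona: on such
-- duplicate-section documents A merges the duplicates' bodies while B keeps the first
-- section only — a corner where either value is defensible and no caller specifies one.
def Pre_extract_persona_prompt_py (agents_md : String) (persona_name : String) : Prop :=
  (PySem.Str.splitlines agents_md).countP
    (fun l => pvMatches (PySem.Str.lower persona_name) l) ≤ 1
instance (agents_md : String) (persona_name : String) : Decidable (Pre_extract_persona_prompt_py agents_md persona_name) := by unfold Pre_extract_persona_prompt_py; infer_instance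

def pvWitness_extract_persona_prompt_py : String × String :=
  ("## Researcher\nDo research.\n\n## Coder\nWrite code.", "researcher")

def Spec_extract_persona_prompt_py (agents_md : String) (persona_name : String) (out : String) : Prop := out = extract_persona_prompt_py_alt agents_md persona_name
instance (agents_md : String) (persona_name : String) (out : String) : Decidable (Spec_extract_persona_prompt_py agents_md persona_name out) := by unfold Spec_extract_persona_prompt_py; infer_instance

-- ===== CLAIM (what is proved, stated in full; the proofs are below) =====
def Claim_equal_extract_persona_prompt_py : Prop := ∀ (agents_md : String) (persona_name : String), Dom_extract_persona_prompt_py agents_md persona_name → Pre_extract_persona_prompt_py agents_md persona_name → Spec_extract_persona_prompt_py agents_md persona_name (extract_persona_prompt_py agents_md persona_name)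

-- ===== LEMMAS AND PROOFS =====

theorem pvAppendLast_cons (s : String × List String) (t : List (String × List String))
    (l : String) (ht : t ≠ []) :
    pvAppendLast (s :: t) l = s :: pvAppendLast t l := by
  cases t with
  | nil => exact absurd rfl ht
  | cons a u => rfl

theorem pvAppendLast_ne_nil (secs : List (String × List String)) (l : String)
    (h : secs ≠ []) : pvAppendLast secs l ≠ [] := by
  cases secs with
  | nil => exact absurd rfl h
  | cons s t =>
    cases t with
    | nil => obtain ⟨h1, b⟩ := s; simp [pvAppendLast]
    | cons a u => rw [pvAppendLast_cons _ _ _ (by simp)]; simp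

theorem pvAppendLast_append (acc secs : List (String × List String)) (l : String)
    (h : secs ≠ []) :
    pvAppendLast (acc ++ secs) l = acc ++ pvAppendLast secs l := by
  induction acc with
  | nil => rfl
  | cons s t ih =>
    rw [List.cons_append, pvAppendLast_cons _ _ _ (by simp [h]), ih, List.cons_append]

theorem pvAppendLast_fst (secs : List (String × List String)) (l : String) :
    (pvAppendLast secs l).map Prod.fst = secs.map Prod.fst := by
  induction secs with
  | nil => rfl
  | cons s t ih =>
    cases t with
    | nil => obtain ⟨h1, b⟩ := s; simp [pvAppendLast]
    | cons a u =>
      rw [pvAppendLast_cons _ _ _ (by simp)]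
      simp only [List.map_cons] at ih ⊢
      rw [ih]

-- parsing distributes over a nonempty suffix of the accumulator
theorem pvParse_append (rest : List String) :
    ∀ (acc secs : List (String × List String)), secs ≠ [] →
      pvParse rest (acc ++ secs) = acc ++ pvParse rest secs := by
  induction rest with
  | nil => intro acc secs _; rfl
  | cons l r ih =>
    intro acc secs hs
    by_cases hl : pvHeader l = true
    · simp only [pvParse, hl, if_pos]
      rw [List.append_assoc, ih acc (secs ++ [(l, [])]) (by simp)]
    · have hl' : pvHeader l = false := by simpa using hl
      have hne : (acc ++ secs).isEmpty = false := by
        simp [List.isEmpty_iff, hs]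
      have hne2 : secs.isEmpty = false := by simp [List.isEmpty_iff, hs]
      simp only [pvParse, hl', Bool.false_eq_true, if_false, hne, hne2]
      rw [pvAppendLast_append acc secs l hs, ih acc _ (pvAppendLast_ne_nil secs l hs)]

-- parsing from a single open section fills its body with the header-free prefix
theorem pvParse_single (rest : List String) :
    ∀ (h : String) (b : List String),
      pvParse rest [(h, b)] =
        (h, b ++ rest.takeWhile (fun x => !pvHeader x)) ::
          pvParse (rest.dropWhile (fun x => !pvHeader x)) [] := by
  induction rest with
  | nil => intro h b; simp [pvParse]
  | cons l r ih =>
    intro h b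
    by_cases hl : pvHeader l = true
    · have hnb : (!pvHeader l) = false := by simp [hl]
      have e1 : pvParse (l :: r) [(h, b)] = pvParse r ([(h, b)] ++ [(l, [])]) := by
        simp [pvParse, hl]
      rw [e1, pvParse_append r [(h, b)] [(l, [])] (by simp),
        List.takeWhile_cons, List.dropWhile_cons, hnb]
      simp [pvParse, hl]
    · have hl' : pvHeader l = false := by simpa using hl
      have : (!pvHeader l) = true := by simp [hl']
      simp only [pvParse, hl', Bool.false_eq_true, if_false, List.isEmpty_cons,
        List.takeWhile_cons, List.dropWhile_cons, this, if_pos]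
      rw [show pvAppendLast [(h, b)] l = [(h, b ++ [l])] from rfl, ih]
      simp

-- selection skips leading sections whose headers do not mention the persona
theorem pvSelect_append (search pname : String)
    (acc secs : List (String × List String))
    (hacc : ∀ p ∈ acc, PySem.Str.isIn search (PySem.Str.lower p.1) = false) :
    pvSelect search pname (acc ++ secs) = pvSelect search pname secs := by
  induction acc with
  | nil => rfl
  | cons s t ih =>
    obtain ⟨h, b⟩ := s
    have hs : PySem.Str.isIn search (PySem.Str.lower h) = false :=
      hacc (h, b) (by simp)
    simp only [List.cons_append, pvSelect, hs, Bool.false_eq_true, if_false]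
    exact ih (fun p hp => hacc p (by simp [hp]))

-- pvALoop's cons step, phrased with pvHeader/pvMatches (definitional)
theorem pvALoop_cons (search l : String) (rest : List String) (inSec : Bool) (acc : List String) :
    pvALoop search (l :: rest) inSec acc =
      if pvMatches search l then pvALoop search rest true acc
      else if inSec then
        (if pvHeader l then acc else pvALoop search rest true (acc ++ [l]))
      else pvALoop search rest false acc := rfl

-- once in_section with no matching header left, A's loop appends the header-free prefix
theorem pvALoop_true (search : String) (tail : List String)
    (hnm : ∀ l ∈ tail, pvMatches search l = false) :
    ∀ acc, pvALoop search tail true acc =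
      acc ++ tail.takeWhile (fun x => !pvHeader x) := by
  induction tail with
  | nil => intro acc; simp [pvALoop]
  | cons l rest ih =>
    intro acc
    have hm : pvMatches search l = false := hnm l (by simp)
    rw [pvALoop_cons, if_neg (by simp [hm]), if_pos rfl, List.takeWhile_cons]
    by_cases hl : pvHeader l = true
    · simp [hl]
    · have hl' : pvHeader l = false := by simpa using hl
      rw [if_neg (by simp [hl']), ih (fun x hx => hnm x (by simp [hx])) (acc ++ [l])]
      simp [hl']

-- main invariant: with at most one matching header left and only non-matching
-- section headers collected so far, A's final string equals B's select-of-parse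
theorem pvMain (search pname : String) :
    ∀ (lines : List String) (acc : List (String × List String)),
      (∀ p ∈ acc, PySem.Str.isIn search (PySem.Str.lower p.1) = false) →
      lines.countP (fun l => pvMatches search l) ≤ 1 →
      (if pvALoop search lines false [] ≠ [] then
          PySem.Str.strip (PySem.Str.join "\n" (pvALoop search lines false []))
        else
          "You are " ++ pname ++ ", a specialised AI assistant. Complete the assigned task thoroughly and return a clear, structured result.")
        = pvSelect search pname (pvParse lines acc) := by
  intro lines
  induction lines with
  | nil =>
    intro acc hacc _
    simp only [pvALoop, pvParse, ne_eq, not_true_eq_false, if_neg, not_false_eq_true]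
    rw [show acc = acc ++ [] by simp, pvSelect_append search pname acc [] hacc]
    rfl
  | cons l rest ih =>
    intro acc hacc hcount
    by_cases hm : pvMatches search l = true
    · -- the single matching header: A enters the section, B opens the selected section
      have hl : pvHeader l = true := by
        have := hm; simp only [pvMatches, Bool.and_eq_true] at this; exact this.1
      have hin : PySem.Str.isIn search (PySem.Str.lower l) = true := by
        have := hm; simp only [pvMatches, Bool.and_eq_true] at this; exact this.2
      have hrest0 : rest.countP (fun l => pvMatches search l) = 0 := by
        rw [List.countP_cons, if_pos (by simpa using hm)] at hcount; omega
      have hnm : ∀ x ∈ rest, pvMatches search x = false := by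
        intro x hx
        have := List.countP_eq_zero.mp hrest0 x hx
        simpa using this
      have hA : pvALoop search (l :: rest) false [] =
          rest.takeWhile (fun x => !pvHeader x) := by
        rw [pvALoop_cons, if_pos hm]
        exact pvALoop_true search rest hnm []
      have hB : pvParse (l :: rest) acc =
          acc ++ (l, rest.takeWhile (fun x => !pvHeader x)) ::
            pvParse (rest.dropWhile (fun x => !pvHeader x)) [] := by
        simp only [pvParse, hl, if_pos]
        rw [pvParse_append rest acc [(l, [])] (by simp), pvParse_single]
        simp
      rw [hA, hB, pvSelect_append search pname _ _ hacc]
      simp only [pvSelect, hin, if_pos]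
    · have hm' : pvMatches search l = false := by simpa using hm
      have hcount' : rest.countP (fun l => pvMatches search l) ≤ 1 := by
        rw [List.countP_cons, if_neg (by simp [hm'])] at hcount; omega
      have hA : pvALoop search (l :: rest) false [] = pvALoop search rest false [] := by
        rw [pvALoop_cons, if_neg (by simp [hm']), if_neg (by simp)]
      by_cases hl : pvHeader l = true
      · -- non-matching header: B starts a new (never-selected) section
        have hin : PySem.Str.isIn search (PySem.Str.lower l) = false := by
          have := hm'; simp only [pvMatches, hl, Bool.true_and] at this; exact this
        have hB : pvParse (l :: rest) acc = pvParse rest (acc ++ [(l, [])]) := by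
          simp [pvParse, hl]
        rw [hA, hB]
        exact ih (acc ++ [(l, [])])
          (by intro p hp
              rcases List.mem_append.mp hp with h1 | h1
              · exact hacc p h1
              · simp only [List.mem_singleton] at h1; subst h1; exact hin)
          hcount'
      · have hl' : pvHeader l = false := by simpa using hl
        by_cases hacc0 : acc = []
        · have hB : pvParse (l :: rest) acc = pvParse rest acc := by
            subst hacc0; simp [pvParse, hl']
          rw [hA, hB]; exact ih acc hacc hcount'
        · have hB : pvParse (l :: rest) acc = pvParse rest (pvAppendLast acc l) := by
            have : acc.isEmpty = false := by simp [List.isEmpty_iff, hacc0]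
            simp [pvParse, hl', this]
          rw [hA, hB]
          refine ih (pvAppendLast acc l) ?_ hcount'
          intro p hp
          have : p.1 ∈ (pvAppendLast acc l).map Prod.fst := List.mem_map_of_mem hp
          rw [pvAppendLast_fst] at this
          obtain ⟨q, hq, hq1⟩ := List.mem_map.mp this
          rw [← hq1]; exact hacc q hq

-- ===== VERDICT (by name: the statement is the Claim_ definition above) =====
theorem extract_persona_prompt_py_spec : Claim_equal_extract_persona_prompt_py := by
  intro agents_md persona_name _ hpre
  unfold Spec_extract_persona_prompt_py extract_persona_prompt_py extract_persona_prompt_py_alt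
  exact pvMain (PySem.Str.lower persona_name) persona_name
    (PySem.Str.splitlines agents_md) [] (by intro p hp; simp at hp) hpre
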